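-- pv_equiv track=rewrite | github.com/touretzkyds/MarkovChainDemo | visualizing_n_grams_server/utils.py | make_trigram_dict
-- ===== SOURCE A (Python) =====
-- def get_words(text_string):
--     "Convert the text to a list of lowercase words with most punctuation removed"
--     remove_chars = ',:;()"\n\t'
--     spacer_chars = '.?!'
--     result_chars = []
--     for char in text_string:
--         if char in remove_chars:
--             result_chars.append(' ')
--         elif char in spacer_chars:
--             result_chars.extend([' ', char, ' '])
--         else:
--             result_chars.append(char.lower())
--     result_string = ''.join(result_chars).strip()
--     while '  ' in result_string:
--         result_string = result_string.replace('  ',' ')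
--     words = result_string.split(' ')
--     return words
--
-- def make_trigram_dict(text_string):
--     words = get_words(text_string)
--     trigram_dict = dict()
--     for i in range(len(words)-2):
--         key = words[i] + ' ' + words[i+1]
--         value = words[i+2]
--         if key not in trigram_dict:
--             trigram_dict[key] = []
--         if value not in trigram_dict[key]:
--             trigram_dict[key].append(value)
--     return trigram_dict
-- ===== SOURCE B (Python) =====
-- def get_words(text_string):
--     "Convert the text to a list of lowercase words with most punctuation removed"
--     remove_chars = ',:;()"\n\t'
--     spacer_chars = '.?!'
--     result_chars = []
--     for char in text_string:
--         if char in remove_chars: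
--             result_chars.append(' ')
--         elif char in spacer_chars:
--             result_chars.extend([' ', char, ' '])
--         else:
--             result_chars.append(char.lower())
--     result_string = ''.join(result_chars).strip()
--     while '  ' in result_string:
--         result_string = result_string.replace('  ',' ')
--     words = result_string.split(' ')
--     return words
--
-- def make_trigram_dict(text_string):
--     words = get_words(text_string)
--     # materialize all (pair-key, follower) trigram records
--     triples = [(words[i] + ' ' + words[i+1], words[i+2]) for i in range(len(words)-2)]
--     # key-major grouping: for each distinct key (first-occurrence order),
--     # scan the records for its followers and dedup them in order
--     return {key: list(dict.fromkeys(v for k, v in triples if k == key))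
--             for key in dict.fromkeys(k for k, _ in triples)}
-- ===== Notes on version B (the rewrite author's own statement) =====
-- stated objective: alternative
-- what changed: A builds the dict in one position-major pass over the sliding window, creating keys and deduplicating followers inline; B first materializes the trigram records, then iterates key-major: for each distinct pair-key in first-occurrence order it scans the record list for that key's followers and dedups them with dict.fromkeys.
import Mathlib
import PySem

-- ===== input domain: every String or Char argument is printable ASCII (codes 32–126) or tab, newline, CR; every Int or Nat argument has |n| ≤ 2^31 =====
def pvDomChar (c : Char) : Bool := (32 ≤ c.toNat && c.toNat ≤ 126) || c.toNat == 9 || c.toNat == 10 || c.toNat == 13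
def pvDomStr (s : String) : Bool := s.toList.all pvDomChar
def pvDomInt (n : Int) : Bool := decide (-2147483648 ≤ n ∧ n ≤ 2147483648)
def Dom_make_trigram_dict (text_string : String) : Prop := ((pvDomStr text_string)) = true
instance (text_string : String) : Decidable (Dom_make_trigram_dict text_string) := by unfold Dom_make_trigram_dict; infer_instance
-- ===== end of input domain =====

-- B re-implements make_trigram_dict key-major: materialize the trigram records once, then for each
-- distinct pair-key (first-occurrence order) scan the records for its followers and dedup them
-- (same return value as A's single-pass dict build; get_words is the shared helper, unchanged).

-- ===== PORT A =====
-- shared helper: the module's get_words (identical in Source A and Source B)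
-- the 'while "  " in s' loop, fueled by the string length (each replace strictly shortens the string)
def pvCollapse : Nat → String → String
  | 0, s => s
  | n+1, s => if PySem.Str.isIn "  " s then pvCollapse n (PySem.Str.replace s "  " " ") else s

def pvGetWords (text_string : String) : List String :=
  let result_chars := text_string.toList.foldl (fun acc c =>
    if [',', ':', ';', '(', ')', '"', '\n', '\t'].contains c then acc ++ [' ']
    else if ['.', '?', '!'].contains c then acc ++ [' ', c, ' ']
    else acc ++ [PySem.Chars.lowerChar c]) []
  let result_string := PySem.Str.strip (String.ofList result_chars)
  let result_string := pvCollapse result_string.toList.length result_string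
  (PySem.Str.split? result_string " ").getD []

-- the body of A's loop: create the key's slot if missing, append value only if unseen
def pvStepA (d : PySem.Dict String (List String)) (key value : String) :
    PySem.Dict String (List String) :=
  let d := if d.contains key then d else d.insert key ([] : List String)
  if value ∈ d.getD key [] then d else d.insert key (d.getD key [] ++ [value])

def make_trigram_dict (text_string : String) : List (String × List String) :=
  let words := pvGetWords text_string
  let d := (PySem.List.pyRange 0 (PySem.List.len words - 2)).foldl
    (fun d i => pvStepA d
      (PySem.List.pyGetD words i "" ++ " " ++ PySem.List.pyGetD words (i+1) "")
      (PySem.List.pyGetD words (i+2) ""))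
    PySem.Dict.empty
  d.items

-- ===== PORT B =====
def make_trigram_dict_alt (text_string : String) : List (String × List String) :=
  let words := pvGetWords text_string
  -- triples = [(words[i] + ' ' + words[i+1], words[i+2]) for i in range(len(words)-2)]
  let triples := (PySem.List.pyRange 0 (PySem.List.len words - 2)).map
    (fun i => (PySem.List.pyGetD words i "" ++ " " ++ PySem.List.pyGetD words (i+1) "",
               PySem.List.pyGetD words (i+2) ""))
  -- {key: list(dict.fromkeys(v for k, v in triples if k == key)) for key in dict.fromkeys(k for k, _ in triples)}
  (PySem.List.dedup (triples.map Prod.fst)).map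
    (fun key => (key, PySem.List.dedup ((triples.filter (fun p => p.1 == key)).map Prod.snd)))

-- ===== PRECONDITION & SPEC =====
def Spec_make_trigram_dict (text_string : String) (out : List (String × List String)) : Prop := out = make_trigram_dict_alt text_string
instance (text_string : String) (out : List (String × List String)) : Decidable (Spec_make_trigram_dict text_string out) := by unfold Spec_make_trigram_dict; infer_instance

-- ===== CLAIM (what is proved, stated in full; the proofs are below) =====
def Claim_equal_make_trigram_dict : Prop := ∀ (text_string : String), Dom_make_trigram_dict text_string → Spec_make_trigram_dict text_string (make_trigram_dict text_string)

-- ===== LEMMAS AND PROOFS =====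

-- the deduped followers of key k among the records L
def pvFoll (L : List (String × String)) (k : String) : List String :=
  PySem.List.dedup ((L.filter (fun p => p.1 == k)).map Prod.snd)

-- B's grouping of a record list
def pvGroup (L : List (String × String)) : List (String × List String) :=
  (PySem.List.dedup (L.map Prod.fst)).map (fun k => (k, pvFoll L k))

-- dict.fromkeys over an append: drop the new element iff already present
theorem pvDedup_append {α : Type} [DecidableEq α] (l : List α) (v : α) :
    PySem.List.dedup (l ++ [v])
      = if v ∈ PySem.List.dedup l then PySem.List.dedup l else PySem.List.dedup l ++ [v] := by
  simp [PySem.List.dedup, PySem.Set.ofList_eq_foldl, PySem.Set.add]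

theorem pvFilter_nil (L : List (String × String)) (k : String) (h : k ∉ L.map Prod.fst) :
    L.filter (fun p => p.1 == k) = [] := by
  rw [List.filter_eq_nil_iff]
  intro p hp
  simp only [beq_iff_eq]
  exact fun he => h (he ▸ List.mem_map_of_mem hp)

theorem pvFoll_append (L : List (String × String)) (k v : String) (k' : String) :
    pvFoll (L ++ [(k, v)]) k'
      = if k' = k then PySem.List.dedup ((L.filter (fun p => p.1 == k')).map Prod.snd ++ [v])
        else pvFoll L k' := by
  unfold pvFoll
  rw [List.filter_append]
  by_cases h : k' = k
  · subst h; simp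
  · simp [Ne.symm h, h]

-- one step of A's inline-dedup loop extends the grouping by one record
theorem pvStepGroup (P : List (String × String)) (k v : String) :
    pvStepA (PySem.Dict.mk (pvGroup P)) k v = PySem.Dict.mk (pvGroup (P ++ [(k, v)])) := by
  set d := PySem.Dict.mk (pvGroup P) with hd
  have hkeys : d.keys = PySem.List.dedup (P.map Prod.fst) := by
    simp [hd, PySem.Dict.keys_mk, pvGroup, Function.comp_def]
  have hnd : d.keys.Nodup := by rw [hkeys]; exact PySem.List.nodup_dedup _
  have hcont : d.contains k = decide (k ∈ P.map Prod.fst) := by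
    rw [PySem.Dict.contains_eq_decide_mem_keys, hkeys]
    exact decide_eq_decide.mpr (PySem.List.mem_dedup _ _)
  have hKdedup : PySem.List.dedup ((P ++ [(k, v)]).map Prod.fst)
      = if k ∈ P.map Prod.fst then PySem.List.dedup (P.map Prod.fst)
        else PySem.List.dedup (P.map Prod.fst) ++ [k] := by
    rw [List.map_append, List.map_cons, List.map_nil, pvDedup_append]
    by_cases hk : k ∈ P.map Prod.fst
    · rw [if_pos ((PySem.List.mem_dedup _ _).mpr hk), if_pos hk]
    · rw [if_neg (fun h => hk ((PySem.List.mem_dedup _ _).mp h)), if_neg hk]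
  by_cases hk : k ∈ P.map Prod.fst
  · -- key already present
    have hc : d.contains k = true := by rw [hcont]; simp [hk]
    have hmem : (k, pvFoll P k) ∈ pvGroup P :=
      List.mem_map_of_mem (by rw [PySem.List.mem_dedup]; exact hk)
    have hget : d.getD k [] = pvFoll P k :=
      PySem.Dict.getD_of_mem_items (d := d) (by exact hmem) hnd []
    unfold pvStepA
    simp only [hc, if_true, hget]
    have hgroup : pvGroup (P ++ [(k, v)])
        = (PySem.List.dedup (P.map Prod.fst)).map (fun k' =>
            (k', if k' = k then PySem.List.dedup ((P.filter (fun p => p.1 == k')).map Prod.snd ++ [v])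
                 else pvFoll P k')) := by
      unfold pvGroup
      rw [hKdedup, if_pos hk]
      exact List.map_congr_left (fun k' _ => by rw [pvFoll_append])
    by_cases hv : v ∈ pvFoll P k
    · simp only [hv, if_true]
      apply PySem.Dict.ext
      show pvGroup P = _
      rw [hgroup]
      unfold pvGroup
      apply List.map_congr_left
      intro k' _
      by_cases he : k' = k
      · subst he
        rw [if_pos rfl]
        unfold pvFoll
        rw [pvDedup_append, if_pos (by simpa [pvFoll] using hv)]
      · rw [if_neg he]
    · simp only [hv, if_false]
      apply PySem.Dict.ext
      rw [PySem.Dict.items_insert_of_contains _ _ hc]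
      show (pvGroup P).map _ = _
      rw [hgroup]
      unfold pvGroup
      rw [List.map_map]
      apply List.map_congr_left
      intro k' _
      simp only [Function.comp_apply]
      by_cases he : k' = k
      · subst he
        simp only [beq_self_eq_true, if_true]
        unfold pvFoll
        rw [pvDedup_append, if_neg (by simpa [pvFoll] using hv)]
      · simp only [if_neg he]
        rw [if_neg (by simpa using he)]
  · -- new key
    have hc : d.contains k = false := by rw [hcont]; simp [hk]
    unfold pvStepA
    simp only [hc, Bool.false_eq_true, if_false]
    rw [PySem.Dict.getD_insert_self]
    simp only [List.not_mem_nil, List.nil_append, if_false]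
    rw [PySem.Dict.insert_insert_self]
    apply PySem.Dict.ext
    rw [PySem.Dict.items_insert_of_not_contains _ _ hc]
    show pvGroup P ++ [(k, [v])] = _
    unfold pvGroup
    rw [hKdedup, if_neg hk, List.map_append]
    congr 1
    · apply List.map_congr_left
      intro k' hk'
      have hne : k' ≠ k := by
        rw [PySem.List.mem_dedup] at hk'
        exact fun he => hk (he ▸ hk')
      rw [pvFoll_append, if_neg hne]
    · simp only [List.map_cons, List.map_nil]
      rw [pvFoll_append]
      have : pvFoll P k = [] := by unfold pvFoll; rw [pvFilter_nil P k hk]; rfl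
      unfold pvFoll at this
      rw [if_pos rfl, pvFilter_nil P k hk]
      rfl

-- the whole loop realizes the grouping
theorem pvLoop :
    ∀ (L P : List (String × String)),
    L.foldl (fun d p => pvStepA d p.1 p.2) (PySem.Dict.mk (pvGroup P))
      = PySem.Dict.mk (pvGroup (P ++ L)) := by
  intro L
  induction L with
  | nil => intro P; rw [List.append_nil]; rfl
  | cons p t ih =>
    intro P
    rw [List.foldl_cons, pvStepGroup P p.1 p.2, ih (P ++ [p])]
    simp

-- ===== VERDICT (by name: the statement is the Claim_ definition above) =====
theorem make_trigram_dict_spec : Claim_equal_make_trigram_dict := by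
  intro text_string _
  unfold Spec_make_trigram_dict make_trigram_dict make_trigram_dict_alt
  dsimp only
  generalize pvGetWords text_string = ws
  have h := pvLoop ((PySem.List.pyRange 0 (PySem.List.len ws - 2)).map
      (fun i => (PySem.List.pyGetD ws i "" ++ " " ++ PySem.List.pyGetD ws (i+1) "",
                 PySem.List.pyGetD ws (i+2) ""))) []
  rw [List.foldl_map] at h
  simp only [List.nil_append] at h
  rw [show (PySem.Dict.empty : PySem.Dict String (List String)) = PySem.Dict.mk (pvGroup []) from rfl, h]
  rfl
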